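-- pv_equiv track=rewrite | github.com/roryholmes96/1 | rim_weighting_algorithm.py | calcFrequencies
-- ===== SOURCE A (Python) =====
-- def calcFrequencies(responses):
--     '''Calculates the frequencies for each possible responses in a survey
--        variable's list of responses
--     '''
--     frequencies = {}
--
--     for response in responses:
--         if response in frequencies.keys():
--             frequencies[response] += 1
--         else:
--             frequencies[response] = 1
--
--     return dict(sorted(frequencies.items()))
-- ===== SOURCE B (Python) =====
-- def calcFrequencies(responses):
--     '''Calculates the frequencies for each possible responses in a survey
--        variable's list of responses (sort once, then group consecutive runs)
--     '''
--     s = sorted(responses)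
--     frequencies = {}
--     i = 0
--     n = len(s)
--     while i < n:
--         j = i + 1
--         while j < n and s[j] == s[i]:
--             j += 1
--         frequencies[s[i]] = j - i
--         i = j
--     return frequencies
-- ===== Notes on version B (the rewrite author's own statement) =====
-- stated objective: alternative
-- what changed: Replaces hash-counting followed by a final sort of the distinct keys with a single sort of all responses followed by one linear run-grouping scan that emits key/count pairs already in key order, with no dict membership tests and no final sort.
import Mathlib
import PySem

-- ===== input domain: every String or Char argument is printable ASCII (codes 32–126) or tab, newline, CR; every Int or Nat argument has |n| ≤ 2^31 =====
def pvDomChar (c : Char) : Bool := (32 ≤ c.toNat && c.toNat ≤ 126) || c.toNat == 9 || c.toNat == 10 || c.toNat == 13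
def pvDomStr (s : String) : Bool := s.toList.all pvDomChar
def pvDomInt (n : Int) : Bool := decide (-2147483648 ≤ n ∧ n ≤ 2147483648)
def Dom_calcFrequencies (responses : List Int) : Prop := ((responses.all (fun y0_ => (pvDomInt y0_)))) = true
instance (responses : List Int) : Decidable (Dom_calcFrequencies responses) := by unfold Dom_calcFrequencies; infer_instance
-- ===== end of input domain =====

-- B sorts the responses once and groups consecutive equal runs in one linear scan,
-- instead of hash-counting into a dict and sorting the distinct keys at the end.


-- ===== PORT A =====
def calcFrequencies (responses : List Int) : List (Int × Int) :=
  let frequencies := responses.foldl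
    (fun d response =>
      if d.contains response then d.insert response (d.getD response 0 + 1)
      else d.insert response 1)
    PySem.Dict.empty
  (PySem.Dict.ofList
    (PySem.List.sorted2 frequencies.items (fun p => p.1) (fun p => p.2))).items

-- ===== PORT B =====
-- outer while loop of Source B: one run (s[i] repeated j - i times) per step
def pvRuns : List Int → List (Int × Int)
  | [] => []
  | x :: rest =>
    (x, 1 + ((rest.takeWhile (fun y => y == x)).length : Int)) ::
      pvRuns (rest.dropWhile (fun y => y == x))
termination_by l => l.length
decreasing_by
  simpa [List.length_cons] using Nat.lt_succ_of_le (List.length_dropWhile_le _ _)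

def calcFrequencies_alt (responses : List Int) : List (Int × Int) :=
  pvRuns (PySem.List.sorted responses (fun x => x) false)

-- ===== PRECONDITION & SPEC =====
def Spec_calcFrequencies (responses : List Int) (out : List (Int × Int)) : Prop := out = calcFrequencies_alt responses
instance (responses : List Int) (out : List (Int × Int)) : Decidable (Spec_calcFrequencies responses out) := by unfold Spec_calcFrequencies; infer_instance

-- ===== CLAIM (what is proved, stated in full; the proofs are below) =====
def Claim_equal_calcFrequencies : Prop := ∀ (responses : List Int), Dom_calcFrequencies responses → Spec_calcFrequencies responses (calcFrequencies responses)

-- ===== LEMMAS AND PROOFS =====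

-- canonical value both ports are proved equal to
def pvCanon (xs : List Int) : List (Int × Int) :=
  (PySem.List.sorted (PySem.Set.ofList xs) (fun k => k) false).map
    (fun k => (k, (List.count k xs : Int)))

theorem pvFoldEqCounter (xs : List Int) :
    xs.foldl (fun d response =>
      if d.contains response then d.insert response (d.getD response 0 + 1)
      else d.insert response 1) PySem.Dict.empty = PySem.Dict.counter xs := by
  have hfun : (fun (d : PySem.Dict Int Int) response =>
      if d.contains response then d.insert response (d.getD response 0 + 1)
      else d.insert response 1)
      = (fun d x => d.insert x (d.getD x 0 + 1)) := by
    funext d x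
    by_cases h : d.contains x
    · simp [h]
    · simp only [Bool.not_eq_true] at h
      simp [h, PySem.Dict.getD_of_not_contains d 0 h]
  rw [hfun, PySem.Dict.foldl_insert_getD_add_one_eq_counter]

theorem pvInsertByCongr {α : Type} (p q : α → α → Bool) (x : α) :
    ∀ (ys : List α), (∀ b ∈ ys, p x b = q x b) →
      PySem.List.insertBy p x ys = PySem.List.insertBy q x ys := by
  intro ys
  induction ys with
  | nil => intro _; rfl
  | cons y ys ih =>
    intro h
    have hxy : p x y = q x y := h y (List.mem_cons_self)
    simp only [PySem.List.insertBy, hxy]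
    by_cases hq : q x y = true
    · simp [hq]
    · simp only [Bool.not_eq_true] at hq
      simp [hq, ih (fun b hb => h b (List.mem_cons_of_mem _ hb))]

theorem pvFoldlInsertByCongr {α : Type} (p q : α → α → Bool) :
    ∀ (l acc : List α), (∀ a ∈ l, ∀ b, (b ∈ acc ∨ b ∈ l) → p a b = q a b) →
      l.foldl (fun acc x => PySem.List.insertBy p x acc) acc
        = l.foldl (fun acc x => PySem.List.insertBy q x acc) acc := by
  intro l
  induction l with
  | nil => intro _ _; rfl
  | cons a l ih =>
    intro acc h
    simp only [List.foldl_cons]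
    rw [pvInsertByCongr p q a acc
      (fun b hb => h a List.mem_cons_self b (Or.inl hb))]
    apply ih
    intro a' ha' b hb
    apply h a' (List.mem_cons_of_mem _ ha')
    rcases hb with hb | hb
    · rcases (PySem.List.mem_insertBy q a b acc).mp hb with rfl | hb
      · exact Or.inr List.mem_cons_self
      · exact Or.inl hb
    · exact Or.inr (List.mem_cons_of_mem _ hb)

theorem pvSorted2EqSortedFst (ys : List (Int × Int))
    (h : ys.Pairwise (fun a b => a.1 ≠ b.1)) :
    PySem.List.sorted2 ys (fun p => p.1) (fun p => p.2) false
      = PySem.List.sorted ys (fun p => p.1) false := by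
  have hsym : Symmetric (fun (a b : Int × Int) => a.1 ≠ b.1) := by
    intro a b hab; exact hab.symm
  have hne : ∀ a ∈ ys, ∀ b ∈ ys, a ≠ b → a.1 ≠ b.1 := by
    intro a ha b hb hab
    exact h.forall hsym ha hb hab
  rw [PySem.List.sorted_eq_foldl_insertBy]
  show ys.foldl (fun acc x => PySem.List.insertBy _ x acc) [] = _
  apply pvFoldlInsertByCongr
  intro a ha b hb
  rcases hb with hb | hb
  · exact absurd hb (List.not_mem_nil)
  by_cases hab : a = b
  · subst hab; simp
  · have : a.1 ≠ b.1 := hne a ha b hb hab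
    rcases lt_trichotomy a.1 b.1 with h1 | h1 | h1
    · simp [h1]
    · exact absurd h1 this
    · simp [h1, lt_asymm h1]

theorem pvItemsOfList (zs : List (Int × Int)) (h : (zs.map Prod.fst).Nodup) :
    (PySem.Dict.ofList zs).items = zs := by
  show (zs.foldl (fun acc p => acc.insert p.1 p.2) PySem.Dict.empty).items = zs
  have := PySem.Dict.items_foldl_insert_fresh (l := zs) (k := Prod.fst) (v := Prod.snd)
    (d := PySem.Dict.empty) (by intro a _; simp [PySem.Dict.contains_empty]) h
  simpa using this

-- A equals the canonical value
theorem pvAEqCanon (xs : List Int) : calcFrequencies xs = pvCanon xs := by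
  unfold calcFrequencies
  simp only [pvFoldEqCounter, PySem.Dict.items_counter]
  have hpw : ((PySem.Set.ofList xs).map (fun k => (k, (List.count k xs : Int)))).Pairwise
      (fun a b => a.1 ≠ b.1) := by
    rw [List.pairwise_map]
    exact PySem.Set.nodup_ofList xs
  rw [pvSorted2EqSortedFst _ hpw]
  have hperm : ((PySem.List.sorted (PySem.Set.ofList xs) (fun k => k) false).map
      (fun k => (k, (List.count k xs : Int)))).Perm
      ((PySem.Set.ofList xs).map (fun k => (k, (List.count k xs : Int)))) :=
    (PySem.List.sorted_perm _ _ _).map _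
  have hplt : ((PySem.List.sorted (PySem.Set.ofList xs) (fun k => k) false).map
      (fun k => (k, (List.count k xs : Int)))).Pairwise (fun a b => a.1 < b.1) := by
    rw [List.pairwise_map]
    exact PySem.List.sorted_ofList_pairwise_lt (xs := xs)
  rw [PySem.List.sorted_eq_of_perm_of_pairwise_lt _ _ _ hperm hplt]
  have hnd : (((PySem.List.sorted (PySem.Set.ofList xs) (fun k => k) false).map
      (fun k => (k, (List.count k xs : Int)))).map Prod.fst).Nodup := by
    rw [List.map_map,
      show (Prod.fst ∘ fun k => ((k : Int), (List.count k xs : Int))) = id from rfl,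
      List.map_id]
    exact ((PySem.List.sorted_perm _ _ _).nodup_iff).mpr (PySem.Set.nodup_ofList xs)
  rw [pvItemsOfList _ hnd]
  rfl

-- ofList produces a sublist (first occurrences kept in order)
theorem pvFoldlAddSublist {α : Type} [BEq α] :
    ∀ (l s : List α), ∃ t, List.foldl PySem.Set.add s l = s ++ t ∧ t.Sublist l := by
  intro l
  induction l with
  | nil => intro s; exact ⟨[], by simp, List.Sublist.refl _⟩
  | cons x l ih =>
    intro s
    simp only [List.foldl_cons, PySem.Set.add]
    by_cases h : PySem.Set.contains s x = true
    · rw [if_pos h]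
      obtain ⟨t, ht, hsub⟩ := ih s
      exact ⟨t, ht, hsub.cons x⟩
    · rw [if_neg h]
      obtain ⟨t, ht, hsub⟩ := ih (s ++ [x])
      exact ⟨x :: t, by simpa using ht, hsub.cons₂ x⟩

theorem pvOfListSublist {α : Type} [BEq α] (l : List α) :
    (PySem.Set.ofList l : List α).Sublist l := by
  obtain ⟨t, ht, hsub⟩ := pvFoldlAddSublist l ([] : List α)
  simpa [PySem.Set.ofList, PySem.Set.empty, ht] using hsub

-- the key list of a ≤-sorted list, deduplicated, is strictly increasing
theorem pvOfListPairwiseLt (l : List Int) (h : l.Pairwise (· ≤ ·)) :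
    (PySem.Set.ofList l : List Int).Pairwise (· < ·) := by
  have hle : (PySem.Set.ofList l : List Int).Pairwise (· ≤ ·) :=
    h.sublist (pvOfListSublist l)
  have hne : (PySem.Set.ofList l : List Int).Pairwise (· ≠ ·) := PySem.Set.nodup_ofList l
  have := hle.and hne
  exact this.imp (fun h => lt_of_le_of_ne h.1 h.2)

theorem pvFoldlAddFilter {α : Type} [BEq α] [LawfulBEq α] (x : α) :
    ∀ (l : List α) (s : PySem.Set α), x ∈ s →
      List.foldl PySem.Set.add s l = List.foldl PySem.Set.add s (l.filter (fun y => !(y == x))) := by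
  intro l
  induction l with
  | nil => intro s _; rfl
  | cons y l ih =>
    intro s hs
    by_cases hyx : y = x
    · subst hyx
      have hadd : PySem.Set.add s y = s := by
        have hcm : PySem.Set.contains s y = true := by
          simp [PySem.Set.contains]; exact hs
        rw [PySem.Set.add, if_pos hcm]
      simp only [List.foldl_cons, List.filter_cons, beq_self_eq_true, Bool.not_true,
        hadd]
      exact ih s hs
    · have hx' : x ∈ PySem.Set.add s y := (PySem.Set.mem_add s y x).mpr (Or.inl hs)
      simp [hyx, ih _ hx', List.foldl_cons]

theorem pvFoldlAddConsNotMem {α : Type} [BEq α] [LawfulBEq α] (x : α) :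
    ∀ (l s : List α), x ∉ l →
      List.foldl PySem.Set.add (x :: s) l = x :: List.foldl PySem.Set.add s l := by
  intro l
  induction l with
  | nil => intro s _; rfl
  | cons y l ih =>
    intro s hx
    have hyx : ¬ (y = x) := fun h => hx (h ▸ List.mem_cons_self)
    have hc : PySem.Set.contains (x :: s) y = PySem.Set.contains s y := by
      simp [PySem.Set.contains, beq_eq_false_iff_ne.mpr hyx]
    simp only [List.foldl_cons, PySem.Set.add, hc]
    by_cases h : PySem.Set.contains s y = true
    · rw [if_pos h, if_pos h]
      exact ih s (fun hm => hx (List.mem_cons_of_mem _ hm))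
    · rw [if_neg h, if_neg h]
      have := ih (s ++ [y]) (fun hm => hx (List.mem_cons_of_mem _ hm))
      simpa using this

theorem pvOfListConsRun (x : Int) (t d : List Int)
    (ht : ∀ y ∈ t, y = x) (hd : x ∉ d) :
    (PySem.Set.ofList (x :: (t ++ d)) : List Int) = x :: PySem.Set.ofList d := by
  have hfilter : (t ++ d).filter (fun y => !(y == x)) = d := by
    rw [List.filter_append]
    have h1 : t.filter (fun y => !(y == x)) = [] := by
      apply List.filter_eq_nil_iff.mpr
      intro a ha; simp [ht a ha]
    have h2 : d.filter (fun y => !(y == x)) = d := by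
      apply List.filter_eq_self.mpr
      intro a ha
      simp only [Bool.not_eq_eq_eq_not, Bool.not_true, beq_eq_false_iff_ne]
      intro h; exact hd (h ▸ ha)
    rw [h1, h2, List.nil_append]
  show List.foldl PySem.Set.add PySem.Set.empty (x :: (t ++ d)) = _
  simp only [List.foldl_cons]
  have hadd : PySem.Set.add PySem.Set.empty x = [x] := by
    simp [PySem.Set.add, PySem.Set.empty, PySem.Set.contains]
  rw [hadd, pvFoldlAddFilter x (t ++ d) [x] List.mem_cons_self, hfilter,
    pvFoldlAddConsNotMem x d [] hd]
  rfl

theorem pvDropWhileHead {α : Type} (p : α → Bool) :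
    ∀ (l : List α) (a : α) (d' : List α), l.dropWhile p = a :: d' → p a = false := by
  intro l
  induction l with
  | nil => intro a d' h; simp [List.dropWhile] at h
  | cons y l ih =>
    intro a d' h
    by_cases hp : p y = true
    · rw [List.dropWhile_cons_of_pos hp] at h
      exact ih a d' h
    · rw [List.dropWhile_cons_of_neg hp] at h
      obtain ⟨rfl, -⟩ : y = a ∧ l = d' := by
        constructor <;> injection h
      exact Bool.not_eq_true _ ▸ hp

theorem pvRunsSorted (l : List Int) (h : l.Pairwise (· ≤ ·)) :
    pvRuns l = (PySem.Set.ofList l : List Int).map (fun k => (k, (List.count k l : Int))) := by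
  induction l using pvRuns.induct with
  | case1 => simp [pvRuns, PySem.Set.ofList, PySem.Set.empty]
  | case2 x rest ih =>
    set t := rest.takeWhile (fun y => y == x) with htdef
    set d := rest.dropWhile (fun y => y == x) with hddef
    have hrest : rest = t ++ d := (List.takeWhile_append_dropWhile).symm
    have ht : ∀ y ∈ t, y = x := by
      intro y hy
      have := List.mem_takeWhile_imp hy
      exact eq_of_beq this
    have hrp : rest.Pairwise (· ≤ ·) := h.of_cons
    have hdp : d.Pairwise (· ≤ ·) := hrp.sublist (List.dropWhile_sublist _)
    have hxle : ∀ y ∈ rest, x ≤ y := fun y hy => List.rel_of_pairwise_cons h hy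
    have hxd : x ∉ d := by
      intro hxmem
      cases hdd : d with
      | nil => rw [hdd] at hxmem; exact absurd hxmem (List.not_mem_nil)
      | cons a d' =>
        have hafail : (a == x) = false :=
          pvDropWhileHead (fun y => y == x) rest a d' (hddef ▸ hdd)
        have hax : a ≠ x := by simpa using hafail
        have hamem : a ∈ rest := by
          rw [hrest, hdd]; exact List.mem_append_right _ List.mem_cons_self
        have h1 : x ≤ a := hxle a hamem
        rw [hdd] at hxmem
        rcases List.mem_cons.mp hxmem with rfl | hxd'
        · exact hax rfl
        · have h2 : a ≤ x := List.rel_of_pairwise_cons (hdd ▸ hdp) hxd'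
          exact hax (le_antisymm h2 h1)
    have hcx : List.count x (x :: rest) = 1 + t.length := by
      rw [hrest, List.count_cons_self, List.count_append]
      have h1 : List.count x t = t.length :=
        List.count_eq_length.mpr (fun b hb => (ht b hb).symm)
      have h2 : List.count x d = 0 := List.count_eq_zero_of_not_mem hxd
      omega
    have hsets : (PySem.Set.ofList (x :: rest) : List Int) = x :: PySem.Set.ofList d := by
      rw [hrest]; exact pvOfListConsRun x t d ht hxd
    have hck : ∀ k ∈ d, k ≠ x → List.count k (x :: rest) = List.count k d := by
      intro k _ hkx
      rw [hrest, List.count_cons_of_ne (Ne.symm hkx), List.count_append]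
      have : List.count k t = 0 :=
        List.count_eq_zero_of_not_mem (fun hk => hkx (ht k hk))
      omega
    rw [show pvRuns (x :: rest)
        = (x, 1 + ((rest.takeWhile (fun y => y == x)).length : Int))
          :: pvRuns (rest.dropWhile (fun y => y == x)) from by rw [pvRuns]]
    rw [hsets, List.map_cons, ih hdp]
    congr 1
    · simp only [← htdef, hcx]; push_cast; ring
    · apply List.map_congr_left
      intro k hk
      have hkd : k ∈ d := (PySem.Set.mem_ofList d k).mp hk
      have hkx : k ≠ x := fun h => hxd (h ▸ hkd)
      rw [hck k hkd hkx]

-- B equals the canonical value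
theorem pvBEqCanon (xs : List Int) : calcFrequencies_alt xs = pvCanon xs := by
  unfold calcFrequencies_alt pvCanon
  set s := PySem.List.sorted xs (fun x => x) false with hs
  have hsp : s.Pairwise (· ≤ ·) := PySem.List.sorted_pairwise xs (fun x => x)
  have hperm : s.Perm xs := PySem.List.sorted_perm xs (fun x => x) false
  rw [pvRunsSorted s hsp]
  have hofl : (PySem.Set.ofList s : List Int)
      = PySem.List.sorted (PySem.Set.ofList xs) (fun k => k) false := by
    apply (PySem.List.sorted_eq_of_perm_of_pairwise_lt _ _ _ _ _).symm
    · apply (List.perm_ext_iff_of_nodup (PySem.Set.nodup_ofList s)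
        (PySem.Set.nodup_ofList xs)).mpr
      intro a
      rw [PySem.Set.mem_ofList, PySem.Set.mem_ofList]
      exact ⟨fun h => hperm.mem_iff.mp h, fun h => hperm.mem_iff.mpr h⟩
    · exact pvOfListPairwiseLt s hsp
  rw [hofl]
  apply List.map_congr_left
  intro k _
  rw [hperm.count_eq]

-- ===== VERDICT (by name: the statement is the Claim_ definition above) =====
theorem calcFrequencies_spec : Claim_equal_calcFrequencies := by
  intro responses _
  show calcFrequencies responses = calcFrequencies_alt responses
  rw [pvAEqCanon, pvBEqCanon]
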